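-- pv_equiv track=rewrite | github.com/Rightscar/utc3 | Universal-Content-Generator-PRODUCTION-FINAL/modules/intelligent_content_preparer.py | _create_entity_instructions
-- ===== SOURCE A (Python) =====
-- from typing import Dict, List, Any, Optional, Tuple
--
-- def _create_entity_instructions(entities: List[Dict[str, Any]]) -> str:
--     """Create instructions for preserving important entities"""
--     if not entities:
--         return "No specific entities to preserve."
--
--     high_priority = [e for e in entities if e['importance'] == 'high']
--     medium_priority = [e for e in entities if e['importance'] == 'medium']
--
--     instructions = []
--
--     if high_priority:
--         entity_names = [e['text'] for e in high_priority]
--         instructions.append(f"MUST preserve these important names/organizations: {', '.join(entity_names)}")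
--
--     if medium_priority:
--         entity_names = [e['text'] for e in medium_priority]
--         instructions.append(f"Should preserve these entities when possible: {', '.join(entity_names)}")
--
--     return '\n'.join(instructions) if instructions else "Preserve key entities mentioned in the text."
-- ===== SOURCE B (Python) =====
-- from typing import Dict, List, Any
--
-- def _create_entity_instructions(entities: List[Dict[str, Any]]) -> str:
--     """Create instructions for preserving important entities"""
--     if not entities:
--         return "No specific entities to preserve."
--
--     buckets = {}
--     for e in entities:
--         imp = e['importance']
--         if imp in ('high', 'medium'):
--             buckets.setdefault(imp, []).append(e['text'])
--
--     lines = []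
--     for key, prefix in (('high', 'MUST preserve these important names/organizations: '),
--                         ('medium', 'Should preserve these entities when possible: ')):
--         texts = buckets.get(key)
--         if texts:
--             lines.append(prefix + ', '.join(texts))
--
--     return '\n'.join(lines) if lines else "Preserve key entities mentioned in the text."
-- ===== Notes on version B (the rewrite author's own statement) =====
-- stated objective: alternative
-- what changed: B replaces A's two separate filter passes (one per importance level) by a single pass that groups texts into an importance->texts dict, then walks an ordered (importance, message-prefix) table to emit the lines.
import Mathlib
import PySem

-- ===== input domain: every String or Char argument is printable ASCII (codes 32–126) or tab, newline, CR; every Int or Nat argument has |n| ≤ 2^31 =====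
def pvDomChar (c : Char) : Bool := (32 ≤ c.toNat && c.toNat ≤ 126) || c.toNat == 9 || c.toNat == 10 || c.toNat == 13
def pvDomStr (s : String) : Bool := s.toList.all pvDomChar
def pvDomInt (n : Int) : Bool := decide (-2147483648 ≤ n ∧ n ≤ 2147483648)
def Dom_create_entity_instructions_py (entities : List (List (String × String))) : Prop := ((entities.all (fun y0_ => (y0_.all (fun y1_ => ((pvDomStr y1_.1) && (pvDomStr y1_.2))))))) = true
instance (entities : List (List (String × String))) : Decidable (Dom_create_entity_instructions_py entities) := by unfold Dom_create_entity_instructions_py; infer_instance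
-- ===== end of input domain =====

-- B groups entity texts by importance in ONE pass over the list and then walks an ordered
-- (importance, message-prefix) table, instead of A's two separate filtering passes; objective: alternative decomposition, same cost.

-- shared helper: e[k] as Python dict lookup, with "" standing in for the KeyError case (excluded by Pre_)
def pvGet (e : List (String × String)) (k : String) : String :=
  ((PySem.Dict.mk e).get? k).getD ""

-- ===== PORT A =====
def create_entity_instructions_py (entities : List (List (String × String))) : String :=
  if entities = [] then "No specific entities to preserve."
  else
    let high_priority := entities.filter (fun e => pvGet e "importance" == "high")
    let medium_priority := entities.filter (fun e => pvGet e "importance" == "medium")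
    let instructions : List String := []
    let instructions :=
      if high_priority ≠ [] then
        instructions ++ ["MUST preserve these important names/organizations: " ++
          PySem.Str.join ", " (high_priority.map (fun e => pvGet e "text"))]
      else instructions
    let instructions :=
      if medium_priority ≠ [] then
        instructions ++ ["Should preserve these entities when possible: " ++
          PySem.Str.join ", " (medium_priority.map (fun e => pvGet e "text"))]
      else instructions
    if instructions ≠ [] then PySem.Str.join "\n" instructions
    else "Preserve key entities mentioned in the text."

-- ===== PORT B =====
-- one loop step of Source B: bucket e['text'] under e['importance'] when it is 'high' or 'medium'
def pvBucketStep (d : PySem.Dict String (List String)) (e : List (String × String)) :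
    PySem.Dict String (List String) :=
  let imp := pvGet e "importance"
  if imp == "high" || imp == "medium" then
    d.insert imp ((d.getD imp []) ++ [pvGet e "text"])
  else d

def create_entity_instructions_py_alt (entities : List (List (String × String))) : String :=
  if entities = [] then "No specific entities to preserve."
  else
    let buckets := entities.foldl pvBucketStep PySem.Dict.empty
    let lines :=
      [("high", "MUST preserve these important names/organizations: "),
       ("medium", "Should preserve these entities when possible: ")].foldl
        (fun (acc : List String) kp =>
          match buckets.get? kp.1 with
          | some texts => if texts ≠ [] then acc ++ [kp.2 ++ PySem.Str.join ", " texts] else acc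
          | none => acc) []
    if lines ≠ [] then PySem.Str.join "\n" lines
    else "Preserve key entities mentioned in the text."

-- ===== PRECONDITION & SPEC =====
-- Pre_ excludes exactly the inputs where Python A raises KeyError: an entity without an
-- 'importance' key, or a high/medium entity without a 'text' key.
def Pre_create_entity_instructions_py (entities : List (List (String × String))) : Prop :=
  ∀ e ∈ entities,
    ((PySem.Dict.mk e).get? "importance").isSome = true ∧
    (((PySem.Dict.mk e).get? "importance" = some "high" ∨
      (PySem.Dict.mk e).get? "importance" = some "medium") →
      ((PySem.Dict.mk e).get? "text").isSome = true)
instance (entities : List (List (String × String))) : Decidable (Pre_create_entity_instructions_py entities) := by unfold Pre_create_entity_instructions_py; infer_instance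

def pvWitness_create_entity_instructions_py : (List (List (String × String))) :=
  [[("importance", "high"), ("text", "Acme Corp")], [("importance", "low")]]

def Spec_create_entity_instructions_py (entities : List (List (String × String))) (out : String) : Prop := out = create_entity_instructions_py_alt entities
instance (entities : List (List (String × String))) (out : String) : Decidable (Spec_create_entity_instructions_py entities out) := by unfold Spec_create_entity_instructions_py; infer_instance

-- ===== CLAIM (what is proved, stated in full; the proofs are below) =====
def Claim_equal_create_entity_instructions_py : Prop := ∀ (entities : List (List (String × String))), Dom_create_entity_instructions_py entities → Pre_create_entity_instructions_py entities → Spec_create_entity_instructions_py entities (create_entity_instructions_py entities)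

-- ===== LEMMAS AND PROOFS =====

-- texts collected for key k, in order (what A computes with filter+map)
def pvTexts (k : String) (entities : List (List (String × String))) : List String :=
  (entities.filter (fun e => pvGet e "importance" == k)).map (fun e => pvGet e "text")

-- how a bucket's Option value grows when a batch of texts is appended
def pvComb (o : Option (List String)) (l : List String) : Option (List String) :=
  match o, l with
  | none, [] => none
  | o, l => some (o.getD [] ++ l)

theorem pvComb_nil (o : Option (List String)) : pvComb o [] = o := by
  cases o <;> simp [pvComb]

theorem pvComb_some (m l : List String) : pvComb (some m) l = some (m ++ l) := by
  cases l <;> simp [pvComb]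

theorem pvBuckets_get? (k : String) (hk : k = "high" ∨ k = "medium")
    (entities : List (List (String × String))) (d : PySem.Dict String (List String)) :
    (entities.foldl pvBucketStep d).get? k = pvComb (d.get? k) (pvTexts k entities) := by
  induction entities generalizing d with
  | nil => simp [pvTexts, pvComb_nil]
  | cons e es ih =>
    simp only [List.foldl_cons]
    rw [ih]
    show pvComb ((pvBucketStep d e).get? k) (pvTexts k es) = _
    unfold pvBucketStep pvTexts
    by_cases himp : pvGet e "importance" = k
    · rw [himp]
      have hg : (k == "high" || k == "medium") = true := by
        rcases hk with h | h <;> simp [h]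
      rw [if_pos hg]
      have : (PySem.Dict.insert d k (d.getD k [] ++ [pvGet e "text"])).get? k
          = some (d.getD k [] ++ [pvGet e "text"]) := by
        simp [pysem]
      rw [this, pvComb_some]
      simp only [List.filter_cons, himp, beq_self_eq_true, if_pos, List.map_cons]
      have hgd : d.getD k [] = (d.get? k).getD [] := rfl
      rw [hgd]
      cases hdk : d.get? k with
      | none => simp [pvComb]
      | some m => rw [pvComb_some]; simp
    · have hfilt : (pvGet e "importance" == k) = false := by simp [himp]
      simp only [List.filter_cons, hfilt, Bool.false_eq_true, if_neg, not_false_iff]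
      by_cases hg : (pvGet e "importance" == "high" || pvGet e "importance" == "medium") = true
      · simp only [hg, if_pos]
        have : (PySem.Dict.insert d (pvGet e "importance") ((d.getD (pvGet e "importance") []) ++ [pvGet e "text"])).get? k = d.get? k := by
          simp [pysem]
          intro h
          exact absurd h.symm himp
        rw [this]
      · simp only [hg]
        simp at hg
        simp

theorem create_entity_instructions_py_spec : Claim_equal_create_entity_instructions_py := by
  intro entities _ _
  show create_entity_instructions_py entities = create_entity_instructions_py_alt entities
  unfold create_entity_instructions_py create_entity_instructions_py_alt
  by_cases hnil : entities = []
  · simp [hnil]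
  · simp only [hnil, if_neg, not_false_iff]
    have hh := pvBuckets_get? "high" (Or.inl rfl) entities PySem.Dict.empty
    have hm := pvBuckets_get? "medium" (Or.inr rfl) entities PySem.Dict.empty
    simp only [List.foldl_cons, List.foldl_nil]
    rw [hh, hm]
    have hE : (PySem.Dict.empty : PySem.Dict String (List String)).get? "high" = none := by decide
    have hE' : (PySem.Dict.empty : PySem.Dict String (List String)).get? "medium" = none := by decide
    rw [hE, hE']
    cases hH : pvTexts "high" entities with
    | nil =>
      cases hM : pvTexts "medium" entities with
      | nil =>
        have h1 : entities.filter (fun e => pvGet e "importance" == "high") = [] := by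
          have := hH; unfold pvTexts at this; exact List.map_eq_nil_iff.mp this
        have h2 : entities.filter (fun e => pvGet e "importance" == "medium") = [] := by
          have := hM; unfold pvTexts at this; exact List.map_eq_nil_iff.mp this
        simp [h1, h2, pvComb]
      | cons t ts =>
        have h1 : entities.filter (fun e => pvGet e "importance" == "high") = [] := by
          have := hH; unfold pvTexts at this; exact List.map_eq_nil_iff.mp this
        have h2 : entities.filter (fun e => pvGet e "importance" == "medium") ≠ [] := by
          intro hc; unfold pvTexts at hM; rw [hc] at hM; simp at hM
        simp [h1, h2, pvComb]
        unfold pvTexts at hM; rw [hM]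
    | cons t ts =>
      have h1 : entities.filter (fun e => pvGet e "importance" == "high") ≠ [] := by
        intro hc; unfold pvTexts at hH; rw [hc] at hH; simp at hH
      cases hM : pvTexts "medium" entities with
      | nil =>
        have h2 : entities.filter (fun e => pvGet e "importance" == "medium") = [] := by
          have := hM; unfold pvTexts at this; exact List.map_eq_nil_iff.mp this
        simp [h1, h2, pvComb]
        unfold pvTexts at hH; rw [hH]
      | cons u us =>
        have h2 : entities.filter (fun e => pvGet e "importance" == "medium") ≠ [] := by
          intro hc; unfold pvTexts at hM; rw [hc] at hM; simp at hM
        simp [h1, h2, pvComb]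
        unfold pvTexts at hH hM
        rw [hH, hM]
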